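-- pv_equiv track=rewrite | github.com/mal1on/checkio-solutions | OReilly/Sort Sorted Groups.py | sorted_groups
-- ===== SOURCE A (Python) =====
-- def sorted_groups(items: list[int]) -> list[int]:
--     # your code here
--     result = []
--     temp1 = []
--     for item in items:
--         temp2 = temp1.copy()
--         temp1.append(item)
--         if temp1 == sorted(temp1) or temp1 == sorted(temp1, reverse=True):
--             continue
--         else:
--             result.append(temp2)
--             temp1 = [item]
--     result.append(temp1)
--     return [item for group in sorted(result) for item in group]
-- ===== SOURCE B (Python) =====
-- def sorted_groups(items: list[int]) -> list[int]:
--     groups = []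
--     cur = []
--     inc = dec = False
--     for x in items:
--         if cur:
--             if cur[-1] < x:
--                 ni, nd = True, dec
--             elif x < cur[-1]:
--                 ni, nd = inc, True
--             else:
--                 ni, nd = inc, dec
--         else:
--             ni, nd = inc, dec
--         if ni and nd:
--             groups.append(cur)
--             cur = [x]
--             inc = dec = False
--         else:
--             cur.append(x)
--             inc, dec = ni, nd
--     groups.append(cur)
--     groups.sort()
--     return [x for g in groups for x in g]
-- ===== Notes on version B (the rewrite author's own statement) =====
-- stated objective: faster
-- what changed: Instead of copying and re-sorting the growing group twice at every element, B maintains two Boolean flags (has an adjacent strict increase / decrease) with one comparison against the group's last element per step, splitting when both flags would hold; groups are then sorted and flattened as before.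
import Mathlib
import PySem

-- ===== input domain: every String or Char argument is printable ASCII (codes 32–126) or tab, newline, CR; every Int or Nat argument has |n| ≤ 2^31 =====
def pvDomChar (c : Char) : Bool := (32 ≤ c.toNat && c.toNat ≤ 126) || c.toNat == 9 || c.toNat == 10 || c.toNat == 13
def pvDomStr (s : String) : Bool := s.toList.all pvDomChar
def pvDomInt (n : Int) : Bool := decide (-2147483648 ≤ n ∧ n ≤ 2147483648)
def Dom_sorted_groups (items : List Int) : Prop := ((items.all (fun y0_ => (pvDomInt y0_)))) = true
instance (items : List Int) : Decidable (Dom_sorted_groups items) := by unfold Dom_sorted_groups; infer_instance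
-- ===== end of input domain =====

-- B replaces A's per-element re-sorting of the growing group (O(n^2 log n)) by two Boolean
-- flags maintained from one adjacent comparison per element; objective: faster (asymptotic).

-- ===== PORT A =====
-- A's for-loop over items, carrying (result, temp1); each step re-sorts temp1 both ways.
def pvLoopA : List Int → List (List Int) → List Int → List (List Int) × List Int
  | [], result, temp1 => (result, temp1)
  | item :: rest, result, temp1 =>
    let t := temp1 ++ [item]
    if t = PySem.List.sorted t (fun x => x) false ∨ t = PySem.List.sorted t (fun x => x) true then
      pvLoopA rest result t
    else
      pvLoopA rest (result ++ [temp1]) [item]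

def sorted_groups (items : List Int) : List Int :=
  let s := pvLoopA items [] []
  let result := s.1 ++ [s.2]
  (PySem.List.sorted result (fun g => g) false).flatMap (fun g => g)

-- ===== PORT B =====
-- B's loop: (groups, cur, inc, dec); inc/dec record whether cur has an adjacent strict
-- increase / decrease; one comparison of x with cur[-1] per element.
def pvLoopB : List Int → List (List Int) → List Int → Bool → Bool → List (List Int) × List Int
  | [], groups, cur, _, _ => (groups, cur)
  | x :: rest, groups, cur, inc, dec =>
    let p : Bool × Bool :=
      match cur.getLast? with
      | some l => if l < x then (true, dec) else if x < l then (inc, true) else (inc, dec)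
      | none => (inc, dec)
    if p.1 && p.2 then
      pvLoopB rest (groups ++ [cur]) [x] false false
    else
      pvLoopB rest groups (cur ++ [x]) p.1 p.2

def sorted_groups_alt (items : List Int) : List Int :=
  let s := pvLoopB items [] [] false false
  let groups := s.1 ++ [s.2]
  (PySem.List.sorted groups (fun g => g) false).flatMap (fun g => g)

-- ===== PRECONDITION & SPEC =====
def Spec_sorted_groups (items : List Int) (out : List Int) : Prop := out = sorted_groups_alt items
instance (items : List Int) (out : List Int) : Decidable (Spec_sorted_groups items out) := by unfold Spec_sorted_groups; infer_instance

-- ===== CLAIM (what is proved, stated in full; the proofs are below) =====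
def Claim_equal_sorted_groups : Prop := ∀ (items : List Int), Dom_sorted_groups items → Spec_sorted_groups items (sorted_groups items)

-- ===== LEMMAS AND PROOFS =====

-- "cur has an adjacent strict increase / decrease"
def pvAdjInc : List Int → Bool
  | a :: b :: t => decide (a < b) || pvAdjInc (b :: t)
  | _ => false

def pvAdjDec : List Int → Bool
  | a :: b :: t => decide (b < a) || pvAdjDec (b :: t)
  | _ => false

lemma pvAdjInc_append : ∀ (l : List Int) (x : Int),
    pvAdjInc (l ++ [x]) =
      (pvAdjInc l || (match l.getLast? with | some a => decide (a < x) | none => false))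
  | [], x => by simp [pvAdjInc]
  | [a], x => by simp [pvAdjInc]
  | a :: b :: t, x => by
    have ih := pvAdjInc_append (b :: t) x
    simp only [List.cons_append] at ih ⊢
    simp only [pvAdjInc, ih, List.getLast?_cons_cons, Bool.or_assoc]

lemma pvAdjDec_append : ∀ (l : List Int) (x : Int),
    pvAdjDec (l ++ [x]) =
      (pvAdjDec l || (match l.getLast? with | some a => decide (x < a) | none => false))
  | [], x => by simp [pvAdjDec]
  | [a], x => by simp [pvAdjDec]
  | a :: b :: t, x => by
    have ih := pvAdjDec_append (b :: t) x
    simp only [List.cons_append] at ih ⊢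
    simp only [pvAdjDec, ih, List.getLast?_cons_cons, Bool.or_assoc]

lemma pvAdjDec_false_iff : ∀ (t : List Int), pvAdjDec t = false ↔ t.IsChain (· ≤ ·)
  | [] => by simp [pvAdjDec]
  | [a] => by simp [pvAdjDec]
  | a :: b :: t => by
    have ih := pvAdjDec_false_iff (b :: t)
    simp [pvAdjDec, ih, List.isChain_cons_cons]

lemma pvAdjInc_false_iff : ∀ (t : List Int), pvAdjInc t = false ↔ t.IsChain (fun a b => b ≤ a)
  | [] => by simp [pvAdjInc]
  | [a] => by simp [pvAdjInc]
  | a :: b :: t => by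
    have ih := pvAdjInc_false_iff (b :: t)
    simp [pvAdjInc, ih, List.isChain_cons_cons]

lemma eq_sorted_iff (t : List Int) :
    t = PySem.List.sorted t (fun x => x) false ↔ pvAdjDec t = false := by
  rw [pvAdjDec_false_iff, List.isChain_iff_pairwise]
  constructor
  · intro h
    have := PySem.List.sorted_pairwise (xs := t) (key := fun x : Int => x)
    rw [← h] at this
    exact this
  · intro h
    exact (PySem.List.sorted_eq_self_of_pairwise t (fun x => x) h).symm

lemma eq_sorted_rev_iff (t : List Int) :
    t = PySem.List.sorted t (fun x => x) true ↔ pvAdjInc t = false := by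
  rw [pvAdjInc_false_iff,
    @List.isChain_iff_pairwise _ (fun a b : Int => b ≤ a) _ ⟨fun h1 h2 => le_trans h2 h1⟩]
  constructor
  · intro h
    have := PySem.List.sorted_pairwise_rev (xs := t) (key := fun x : Int => x)
    rw [← h] at this
    exact this
  · intro h
    exact (PySem.List.sorted_rev_eq_self_of_pairwise t (fun x => x) h).symm

lemma loop_eq : ∀ (rest : List Int) (res : List (List Int)) (cur : List Int),
    pvLoopB rest res cur (pvAdjInc cur) (pvAdjDec cur) = pvLoopA rest res cur
  | [], res, cur => rfl
  | x :: rest, res, cur => by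
    show pvLoopB (x :: rest) res cur (pvAdjInc cur) (pvAdjDec cur) = pvLoopA (x :: rest) res cur
    have hinc := pvAdjInc_append cur x
    have hdec := pvAdjDec_append cur x
    have hni : (match cur.getLast? with
        | some l => if l < x then (true, pvAdjDec cur)
            else if x < l then (pvAdjInc cur, true) else (pvAdjInc cur, pvAdjDec cur)
        | none => (pvAdjInc cur, pvAdjDec cur)) = (pvAdjInc (cur ++ [x]), pvAdjDec (cur ++ [x])) := by
      rcases h : cur.getLast? with _ | l
      · simp [hinc, hdec, h]
      · simp only [hinc, hdec, h]
        rcases lt_trichotomy l x with hlt | heq | hgt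
        · simp [hlt, not_lt.mpr (le_of_lt hlt)]
        · simp [heq]
        · simp [hgt, not_lt.mpr (le_of_lt hgt)]
    simp only [pvLoopA, pvLoopB, hni]
    by_cases hc : (cur ++ [x]) = PySem.List.sorted (cur ++ [x]) (fun x => x) false ∨
        (cur ++ [x]) = PySem.List.sorted (cur ++ [x]) (fun x => x) true
    · have hflag : (pvAdjInc (cur ++ [x]) && pvAdjDec (cur ++ [x])) = false := by
        rcases hc with h | h
        · rw [eq_sorted_iff] at h; simp [h]
        · rw [eq_sorted_rev_iff] at h; simp [h]
      simp only [hflag, if_pos hc, Bool.false_eq_true, if_false]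
      exact loop_eq rest res (cur ++ [x])
    · have hflag : (pvAdjInc (cur ++ [x]) && pvAdjDec (cur ++ [x])) = true := by
        have d1 : pvAdjDec (cur ++ [x]) = true := by
          cases hdf : pvAdjDec (cur ++ [x]) with
          | false => exact absurd ((eq_sorted_iff _).mpr hdf) (fun h => hc (Or.inl h))
          | true => rfl
        have d2 : pvAdjInc (cur ++ [x]) = true := by
          cases hdf : pvAdjInc (cur ++ [x]) with
          | false => exact absurd ((eq_sorted_rev_iff _).mpr hdf) (fun h => hc (Or.inr h))
          | true => rfl
        simp [d1, d2]
      simp only [hflag, if_true, if_neg hc]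
      have := loop_eq rest (res ++ [cur]) [x]
      simpa [pvAdjInc, pvAdjDec] using this

-- ===== VERDICT (by name: the statement is the Claim_ definition above) =====
theorem sorted_groups_spec : Claim_equal_sorted_groups := by
  intro items _
  unfold Spec_sorted_groups sorted_groups sorted_groups_alt
  have h := loop_eq items [] []
  simp only [pvAdjInc, pvAdjDec] at h
  rw [h]
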